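-- pv_equiv track=rewrite | github.com/lanamkaa/Diplom | bot/command_logic.py | find_closest_command
-- ===== SOURCE A (Python) =====
-- valid_commands = ["start", "services", "ask", "help", "feedback", "check_link", "analyze"]
--
-- def levenshtein_distance(s1, s2):
--     if len(s1) < len(s2): return levenshtein_distance(s2, s1)
--     if not s2: return len(s1)
--     prev_row = range(len(s2) + 1)
--     for i, c1 in enumerate(s1):
--         curr_row = [i + 1]
--         for j, c2 in enumerate(s2):
--             insert = prev_row[j + 1] + 1
--             delete = curr_row[j] + 1
--             replace = prev_row[j] + (c1 != c2)
--             curr_row.append(min(insert, delete, replace))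
--         prev_row = curr_row
--     return prev_row[-1]
--
-- def find_closest_command(user_input):
--     min_distance = float("inf")
--     closest = None
--     for cmd in valid_commands:
--         dist = levenshtein_distance(user_input, cmd)
--         if dist <= 2 and dist < min_distance:
--             min_distance = dist
--             closest = cmd
--     return closest
-- ===== SOURCE B (Python) =====
-- # B: skips commands whose length differs from the input by 3+ (their distance is
-- # necessarily > 2), and computes the remaining distances by a top-down memoized
-- # recursion over the two prefix lengths (A runs a bottom-up rolling-row DP on every
-- # command); selection keeps the first-wins strict-less rule via a sentinel
-- # threshold of 3 instead of an infinite initial minimum plus a separate <= 2 test.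
--
-- valid_commands = ["start", "services", "ask", "help", "feedback", "check_link", "analyze"]
--
-- def _lev(s1, s2):
--     cache = {}
--     def lev(i, j):
--         if (i, j) in cache:
--             return cache[(i, j)]
--         if i == 0:
--             v = j
--         elif j == 0:
--             v = i
--         elif s1[i - 1] == s2[j - 1]:
--             v = lev(i - 1, j - 1)
--         else:
--             v = 1 + min(lev(i - 1, j), lev(i, j - 1), lev(i - 1, j - 1))
--         cache[(i, j)] = v
--         return v
--     return lev(len(s1), len(s2))
--
-- def find_closest_command(user_input):
--     best = None
--     best_d = 3
--     n = len(user_input)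
--     for cmd in valid_commands:
--         if abs(n - len(cmd)) >= 3:
--             continue
--         d = _lev(user_input, cmd)
--         if d < best_d:
--             best_d = d
--             best = cmd
--     return best
-- ===== Notes on version B (the rewrite author's own statement) =====
-- stated objective: faster
-- what changed: B prunes commands whose length differs from the input by 3 or more (their distance necessarily exceeds 2) and computes the remaining distances by a top-down memoized recursion over the two prefix lengths with an explicit cache dict, instead of A's bottom-up rolling-row DP run on every command; the selection fold uses a sentinel threshold 3 instead of an infinite initial minimum with a separate <=2 test.
import Mathlib
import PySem

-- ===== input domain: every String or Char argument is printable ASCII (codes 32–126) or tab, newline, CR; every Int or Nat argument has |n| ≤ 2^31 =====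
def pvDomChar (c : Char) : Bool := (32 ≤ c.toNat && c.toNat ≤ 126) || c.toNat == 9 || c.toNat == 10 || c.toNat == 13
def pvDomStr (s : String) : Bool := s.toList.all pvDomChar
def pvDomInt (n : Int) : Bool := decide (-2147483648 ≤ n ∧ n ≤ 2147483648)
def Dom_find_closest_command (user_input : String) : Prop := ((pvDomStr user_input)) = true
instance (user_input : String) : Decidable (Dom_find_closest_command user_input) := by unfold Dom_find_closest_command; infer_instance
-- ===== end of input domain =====

-- B prunes commands whose length differs by 3+ and replaces A's bottom-up rolling-row
-- Levenshtein DP by a top-down memoized recursion on the two prefix lengths, selecting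
-- with a sentinel threshold 3
-- instead of an infinite initial minimum plus a separate <= 2 test (objective: faster).

-- ===== PORT A =====
def validCommands : List String :=
  ["start", "services", "ask", "help", "feedback", "check_link", "analyze"]

-- the two nested for-loops of levenshtein_distance, as folds over enumerate;
-- prev_row/curr_row are the Python row lists (Python ints -> Int)
def levRow (s1 s2 : List Char) : List Int :=
  (PySem.List.enumerate s1 0).foldl
    (fun prev p =>
      (PySem.List.enumerate s2 0).foldl
        (fun curr q =>
          curr ++ [min (min (PySem.List.pyGetD prev (q.1 + 1) 0 + 1)
                            (PySem.List.pyGetD curr q.1 0 + 1))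
                       (PySem.List.pyGetD prev q.1 0 + (if p.2 ≠ q.2 then 1 else 0))])
        [p.1 + 1])
    (PySem.List.pyRange 0 ((s2.length : Int) + 1) 1)

-- body of levenshtein_distance after the swap guard; rows are never empty, so
-- prev_row[-1] is pyGetD _ (-1) 0 (exact: no IndexError is reachable)
def levACore (s1 s2 : List Char) : Int :=
  if s2 = [] then (s1.length : Int)
  else PySem.List.pyGetD (levRow s1 s2) (-1) 0

-- the 'if len(s1) < len(s2): return levenshtein_distance(s2, s1)' swap recurses exactly
-- once (the swapped call never swaps again), transliterated as a single swap
def levA (s1 s2 : List Char) : Int :=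
  if s1.length < s2.length then levACore s2 s1 else levACore s1 s2

def find_closest_command (user_input : String) : Option String :=
  (validCommands.foldl
    (fun (st : Option Int × Option String) cmd =>
      let dist := levA user_input.toList cmd.toList
      -- min_distance = float("inf") ported as none; 'dist <= 2 and dist < min_distance'
      if (decide (dist ≤ 2) && (match st.1 with
                                | none => true
                                | some m => decide (dist < m))) = true
      then (some dist, some cmd) else st)
    (none, none)).2

-- ===== PORT B =====
-- top-down recursion of Source B's lev(i, j) on the prefix lengths; s[i-1] is getD (i-1) ' '
-- (exact: lev is only called with i ≤ len s1, j ≤ len s2, so the default is never read)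
-- port of Source B's lev(i, j): top-down recursion with an explicit memo dict threaded
-- through (Source B's cache); s[i-1] is s[i-1]? with getD ' ' (exact: lev is only called
-- with i ≤ len s1, j ≤ len s2, so the default is never read)
def levMemo (s1 s2 : List Char) : Nat → Nat → PySem.Dict (Nat × Nat) Int → Int × PySem.Dict (Nat × Nat) Int
  | i, j, cache =>
    match cache.get? (i, j) with
    | some v => (v, cache)
    | none =>
      match i, j with
      | 0, j => ((j : Int), cache.insert (0, j) (j : Int))
      | i+1, 0 => ((i : Int) + 1, cache.insert (i+1, 0) ((i : Int) + 1))
      | i+1, j+1 =>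
        if s1[i]?.getD ' ' = s2[j]?.getD ' ' then
          let r := levMemo s1 s2 i j cache
          (r.1, r.2.insert (i+1, j+1) r.1)
        else
          let r1 := levMemo s1 s2 i (j+1) cache
          let r2 := levMemo s1 s2 (i+1) j r1.2
          let r3 := levMemo s1 s2 i j r2.2
          let v := 1 + min (min r1.1 r2.1) r3.1
          (v, r3.2.insert (i+1, j+1) v)
  termination_by i j _ => i + j

def find_closest_command_alt (user_input : String) : Option String :=
  (validCommands.foldl
    (fun (st : Option String × Int) cmd =>
      if 3 ≤ ((user_input.toList.length : Int) - (cmd.toList.length : Int)).natAbs then st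
      else
        let d := (levMemo user_input.toList cmd.toList user_input.toList.length cmd.toList.length PySem.Dict.empty).1
        if d < st.2 then (some cmd, d) else st)
    (none, 3)).1

-- ===== PRECONDITION & SPEC =====
def Spec_find_closest_command (user_input : String) (out : Option String) : Prop := out = find_closest_command_alt user_input
instance (user_input : String) (out : Option String) : Decidable (Spec_find_closest_command user_input out) := by unfold Spec_find_closest_command; infer_instance

-- ===== CLAIM (what is proved, stated in full; the proofs are below) =====
def Claim_equal_find_closest_command : Prop := ∀ (user_input : String), Dom_find_closest_command user_input → Spec_find_closest_command user_input (find_closest_command user_input)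

-- ===== LEMMAS AND PROOFS =====

-- proof-side specification of B: the plain (unmemoized) prefix-length recursion
def lev2 (s1 s2 : List Char) : Nat → Nat → Int
  | 0, j => (j : Int)
  | i+1, 0 => (i : Int) + 1
  | i+1, j+1 =>
      if s1[i]?.getD ' ' = s2[j]?.getD ' ' then lev2 s1 s2 i j
      else 1 + min (min (lev2 s1 s2 i (j+1)) (lev2 s1 s2 (i+1) j)) (lev2 s1 s2 i j)
  termination_by i j => i + j


theorem lev2_zero_right (s1 s2 : List Char) (i : Nat) : lev2 s1 s2 i 0 = (i : Int) := by
  cases i <;> simp [lev2]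

-- the four neighbour bounds |d(i+1,j) - d(i,j)| ≤ 1, |d(i,j+1) - d(i,j)| ≤ 1
theorem lev2_bounds (s1 s2 : List Char) :
    ∀ (n i j : Nat), i + j = n →
      lev2 s1 s2 i j ≤ lev2 s1 s2 (i+1) j + 1 ∧
      lev2 s1 s2 (i+1) j ≤ lev2 s1 s2 i j + 1 ∧
      lev2 s1 s2 i j ≤ lev2 s1 s2 i (j+1) + 1 ∧
      lev2 s1 s2 i (j+1) ≤ lev2 s1 s2 i j + 1 := by
  intro n
  induction n using Nat.strong_induction_on with
  | _ n IH =>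
  intro i j hij
  refine ⟨?_, ?_, ?_, ?_⟩
  · cases j with
    | zero => rw [lev2_zero_right, lev2_zero_right]; push_cast; omega
    | succ j' =>
      obtain ⟨h1, h2, h3, h4⟩ := IH (i + j') (by omega) i j' rfl
      simp only [lev2]; split_ifs with h <;> omega
  · cases j with
    | zero => rw [lev2_zero_right, lev2_zero_right]; push_cast; omega
    | succ j' =>
      obtain ⟨h1, h2, h3, h4⟩ := IH (i + j') (by omega) i j' rfl
      simp only [lev2]; split_ifs with h <;> omega
  · cases i with
    | zero => simp only [lev2]; push_cast; omega
    | succ i' =>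
      obtain ⟨h1, h2, h3, h4⟩ := IH (i' + j) (by omega) i' j rfl
      simp only [lev2]; split_ifs with h <;> omega
  · cases i with
    | zero => simp only [lev2]; push_cast; omega
    | succ i' =>
      obtain ⟨h1, h2, h3, h4⟩ := IH (i' + j) (by omega) i' j rfl
      simp only [lev2]; split_ifs with h <;> omega

theorem lev2_cell (s1 s2 : List Char) (i j : Nat) :
    lev2 s1 s2 (i+1) (j+1) =
      min (min (lev2 s1 s2 i (j+1) + 1) (lev2 s1 s2 (i+1) j + 1))
          (lev2 s1 s2 i j + (if s1[i]?.getD ' ' ≠ s2[j]?.getD ' ' then (1:Int) else 0)) := by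
  obtain ⟨h1, h2, h3, h4⟩ := lev2_bounds s1 s2 (i + j) i j rfl
  by_cases h : s1[i]?.getD ' ' = s2[j]?.getD ' ' <;> simp [lev2, h] <;> omega

theorem lev2_symm (s1 s2 : List Char) :
    ∀ (n i j : Nat), i + j = n → lev2 s1 s2 i j = lev2 s2 s1 j i := by
  intro n
  induction n using Nat.strong_induction_on with
  | _ n IH =>
  intro i j hij
  cases i with
  | zero => cases j with
    | zero => simp only [lev2]
    | succ j' => simp only [lev2]; push_cast; ring
  | succ i' => cases j with
    | zero => simp only [lev2]; push_cast; ring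
    | succ j' =>
      have e1 := IH (i' + (j' + 1)) (by omega) i' (j' + 1) rfl
      have e2 := IH ((i' + 1) + j') (by omega) (i' + 1) j' rfl
      have e3 := IH (i' + j') (by omega) i' j' rfl
      simp only [lev2]
      by_cases h : s1[i']?.getD ' ' = s2[j']?.getD ' '
      · rw [if_pos h, if_pos h.symm]; exact e3
      · rw [if_neg h, if_neg (Ne.symm h), e1, e2, e3]
        omega

-- the edit distance is at least the length difference (justifies B's pruning)
theorem lev2_diff (s1 s2 : List Char) :
    ∀ (n i j : Nat), i + j = n →
      (i : Int) - j ≤ lev2 s1 s2 i j ∧ (j : Int) - i ≤ lev2 s1 s2 i j := by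
  intro n
  induction n using Nat.strong_induction_on with
  | _ n IH =>
  intro i j hij
  cases i with
  | zero => cases j with
    | zero => simp only [lev2]; omega
    | succ j' => simp only [lev2]; push_cast; omega
  | succ i' => cases j with
    | zero => rw [lev2_zero_right]; push_cast; omega
    | succ j' =>
      obtain ⟨a1, a2⟩ := IH (i' + j') (by omega) i' j' rfl
      obtain ⟨b1, b2⟩ := IH (i' + (j' + 1)) (by omega) i' (j' + 1) rfl
      obtain ⟨c1, c2⟩ := IH ((i' + 1) + j') (by omega) (i' + 1) j' rfl
      simp only [lev2]
      split_ifs with h <;> push_cast <;> push_cast at * <;> omega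

-- the inner for-loop builds the row of lev2 values at i+1
theorem inner_loop (s1 s2 : List Char) (i : Nat) (c1 : Char) (hc1 : c1 = s1[i]?.getD ' ') :
    ∀ (t : List Char) (p : Nat), s2.drop p = t → p ≤ s2.length →
      (PySem.List.enumerate t (p : Int)).foldl
        (fun curr q =>
          curr ++ [min (min (PySem.List.pyGetD ((List.range (s2.length + 1)).map (fun j => lev2 s1 s2 i j)) (q.1 + 1) 0 + 1)
                            (PySem.List.pyGetD curr q.1 0 + 1))
                       (PySem.List.pyGetD ((List.range (s2.length + 1)).map (fun j => lev2 s1 s2 i j)) q.1 0 + (if c1 ≠ q.2 then 1 else 0))])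
        ((List.range (p + 1)).map (fun j => lev2 s1 s2 (i+1) j))
      = (List.range (s2.length + 1)).map (fun j => lev2 s1 s2 (i+1) j) := by
  intro t
  induction t with
  | nil =>
    intro p hdrop hle
    have hp : p = s2.length := by
      have := List.drop_eq_nil_iff.mp hdrop; omega
    subst hp
    simp [PySem.List.enumerate]
  | cons c t' ih =>
    intro p hdrop hle
    have hlen : (s2.drop p).length = t'.length + 1 := by rw [hdrop]; rfl
    rw [List.length_drop] at hlen
    have hp : p < s2.length := by omega
    have hgp : s2[p]? = some c := by
      rw [← Nat.add_zero p, ← List.getElem?_drop, hdrop]; rfl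
    rw [PySem.List.enumerate_cons, List.foldl_cons]
    have g1 : PySem.List.pyGetD ((List.range (s2.length + 1)).map (fun j => lev2 s1 s2 i j)) ((p : Int) + 1) 0
        = lev2 s1 s2 i (p + 1) := by
      rw [show ((p : Int) + 1) = (((p + 1 : Nat)) : Int) by push_cast; ring,
          PySem.List.pyGetD_natCast, PySem.List.getD_map_range _ _ _ _ (by omega)]
    have g2 : PySem.List.pyGetD ((List.range (p + 1)).map (fun j => lev2 s1 s2 (i+1) j)) (p : Int) 0
        = lev2 s1 s2 (i+1) p := by
      rw [PySem.List.pyGetD_natCast, PySem.List.getD_map_range _ _ _ _ (by omega)]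
    have g3 : PySem.List.pyGetD ((List.range (s2.length + 1)).map (fun j => lev2 s1 s2 i j)) (p : Int) 0
        = lev2 s1 s2 i p := by
      rw [PySem.List.pyGetD_natCast, PySem.List.getD_map_range _ _ _ _ (by omega)]
    have hval : min (min (lev2 s1 s2 i (p + 1) + 1) (lev2 s1 s2 (i+1) p + 1))
        (lev2 s1 s2 i p + (if c1 ≠ c then 1 else 0)) = lev2 s1 s2 (i+1) (p+1) := by
      rw [lev2_cell s1 s2 i p, hc1, hgp]; rfl
    have hacc : (List.range (p + 1)).map (fun j => lev2 s1 s2 (i+1) j) ++ [lev2 s1 s2 (i+1) (p+1)]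
        = (List.range (p + 1 + 1)).map (fun j => lev2 s1 s2 (i+1) j) := by
      conv_rhs => rw [List.range_succ]
      rw [List.map_append, List.map_singleton]
    simp only [g1, g2, g3, hval, hacc]
    have hd : s2.drop (p + 1) = t' := by
      have h2 := congrArg (List.drop 1) hdrop
      rw [List.drop_drop] at h2
      simpa [Nat.add_comm] using h2
    have := ih (p + 1) hd (by omega)
    rw [show ((p : Int) + 1) = (((p + 1 : Nat)) : Int) by push_cast; ring]
    exact this

-- the outer for-loop: each pass turns the row at i into the row at i+1
theorem outer_loop (s1 s2 : List Char) :
    ∀ (t : List Char) (i : Nat), s1.drop i = t → i ≤ s1.length →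
      (PySem.List.enumerate t (i : Int)).foldl
        (fun prev p =>
          (PySem.List.enumerate s2 0).foldl
            (fun curr q =>
              curr ++ [min (min (PySem.List.pyGetD prev (q.1 + 1) 0 + 1)
                                (PySem.List.pyGetD curr q.1 0 + 1))
                           (PySem.List.pyGetD prev q.1 0 + (if p.2 ≠ q.2 then 1 else 0))])
            [p.1 + 1])
        ((List.range (s2.length + 1)).map (fun j => lev2 s1 s2 i j))
      = (List.range (s2.length + 1)).map (fun j => lev2 s1 s2 s1.length j) := by
  intro t
  induction t with
  | nil =>
    intro i hdrop hle
    have hp : i = s1.length := by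
      have := List.drop_eq_nil_iff.mp hdrop; omega
    subst hp
    simp [PySem.List.enumerate]
  | cons c1 t' ih =>
    intro i hdrop hle
    have hlen : (s1.drop i).length = t'.length + 1 := by rw [hdrop]; rfl
    rw [List.length_drop] at hlen
    have hgp : s1[i]? = some c1 := by
      rw [← Nat.add_zero i, ← List.getElem?_drop, hdrop]; rfl
    have hd : s1.drop (i + 1) = t' := by
      have h2 := congrArg (List.drop 1) hdrop
      rw [List.drop_drop] at h2
      simpa [Nat.add_comm] using h2
    rw [PySem.List.enumerate_cons, List.foldl_cons]
    have hinit : [((i : Int)) + 1] = (List.range (0 + 1)).map (fun j => lev2 s1 s2 (i+1) j) := by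
      simp [lev2]
    have hinner := inner_loop s1 s2 i c1 (by rw [hgp]; rfl) s2 0 rfl (Nat.zero_le _)
    rw [Nat.cast_zero] at hinner
    rw [show (PySem.List.enumerate s2 0).foldl
        (fun curr q =>
          curr ++ [min (min (PySem.List.pyGetD ((List.range (s2.length + 1)).map (fun j => lev2 s1 s2 i j)) (q.1 + 1) 0 + 1)
                            (PySem.List.pyGetD curr q.1 0 + 1))
                       (PySem.List.pyGetD ((List.range (s2.length + 1)).map (fun j => lev2 s1 s2 i j)) q.1 0 + (if c1 ≠ q.2 then 1 else 0))])
        [((i : Int)) + 1]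
      = (List.range (s2.length + 1)).map (fun j => lev2 s1 s2 (i+1) j) from by rw [hinit]; exact hinner]
    have := ih (i + 1) hd (by omega)
    rw [show ((i : Int) + 1) = (((i + 1 : Nat)) : Int) by push_cast; ring]
    exact this

theorem levRow_eq (s1 s2 : List Char) :
    levRow s1 s2 = (List.range (s2.length + 1)).map (fun j => lev2 s1 s2 s1.length j) := by
  unfold levRow
  rw [show ((s2.length : Int) + 1) = (((s2.length + 1 : Nat)) : Int) by push_cast; ring,
      PySem.List.pyRange_zero_nat]
  have h0 : (List.range (s2.length + 1)).map (fun k => ((k : Nat) : Int))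
      = (List.range (s2.length + 1)).map (fun j => lev2 s1 s2 0 j) := by
    apply List.map_congr_left
    intro a _
    simp [lev2]
  rw [h0, show (0 : Int) = ((0 : Nat) : Int) by simp]
  exact outer_loop s1 s2 s1 0 rfl (Nat.zero_le _)

theorem levACore_eq (s1 s2 : List Char) :
    levACore s1 s2 = lev2 s1 s2 s1.length s2.length := by
  unfold levACore
  split_ifs with h
  · subst h; simp [lev2_zero_right]
  · rw [levRow_eq]
    conv_lhs => rw [List.range_succ]
    rw [List.map_append, List.map_singleton, PySem.List.pyGetD_neg_one_append_singleton]

theorem levA_eq (s1 s2 : List Char) :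
    levA s1 s2 = lev2 s1 s2 s1.length s2.length := by
  unfold levA
  split_ifs with h
  · rw [levACore_eq, lev2_symm s2 s1 (s2.length + s1.length) _ _ rfl]
  · rw [levACore_eq]

-- the memo cache only ever holds correct lev2 values
def GoodCache (s1 s2 : List Char) (cache : PySem.Dict (Nat × Nat) Int) : Prop :=
  ∀ (i j : Nat) (v : Int), cache.get? (i, j) = some v → v = lev2 s1 s2 i j

theorem good_insert (s1 s2 : List Char) (cache : PySem.Dict (Nat × Nat) Int) (i j : Nat) (v : Int)
    (h : GoodCache s1 s2 cache) (hv : v = lev2 s1 s2 i j) :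
    GoodCache s1 s2 (cache.insert (i, j) v) := by
  intro i' j' w hw
  rw [PySem.Dict.get?_insert] at hw
  split_ifs at hw with he
  · obtain ⟨e1, e2⟩ := Prod.mk.injEq .. ▸ he
    subst e1; subst e2
    cases hw
    exact hv
  · exact h _ _ _ hw

theorem levMemo_good (s1 s2 : List Char) :
    ∀ (n i j : Nat) (cache : PySem.Dict (Nat × Nat) Int), i + j = n → GoodCache s1 s2 cache →
      (levMemo s1 s2 i j cache).1 = lev2 s1 s2 i j ∧ GoodCache s1 s2 (levMemo s1 s2 i j cache).2 := by
  intro n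
  induction n using Nat.strong_induction_on with
  | _ n IH =>
  intro i j cache hij hgood
  rw [levMemo.eq_def]
  cases hg : cache.get? (i, j) with
  | some v => simp only [hg]; exact ⟨hgood _ _ _ hg, hgood⟩
  | none =>
    simp only [hg]
    cases i with
    | zero =>
      dsimp only
      refine ⟨by simp only [lev2], good_insert _ _ _ _ _ _ hgood (by simp only [lev2])⟩
    | succ i' =>
      cases j with
      | zero =>
        dsimp only
        refine ⟨(lev2_zero_right s1 s2 (i'+1)).symm.trans (by ring),
                good_insert _ _ _ _ _ _ hgood (by rw [lev2_zero_right]; push_cast; ring_nf)⟩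
      | succ j' =>
        dsimp only
        by_cases hch : s1[i']?.getD ' ' = s2[j']?.getD ' '
        · rw [if_pos hch]
          obtain ⟨hv, hc⟩ := IH (i' + j') (by omega) i' j' cache rfl hgood
          have hval : (levMemo s1 s2 i' j' cache).1 = lev2 s1 s2 (i'+1) (j'+1) := by
            rw [hv]; simp only [lev2]; rw [if_pos hch]
          exact ⟨hval, good_insert _ _ _ _ _ _ hc hval⟩
        · rw [if_neg hch]
          obtain ⟨hv1, hc1⟩ := IH (i' + (j'+1)) (by omega) i' (j'+1) cache rfl hgood
          obtain ⟨hv2, hc2⟩ := IH ((i'+1) + j') (by omega) (i'+1) j' _ rfl hc1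
          obtain ⟨hv3, hc3⟩ := IH (i' + j') (by omega) i' j' _ rfl hc2
          have hval : 1 + min (min (levMemo s1 s2 i' (j'+1) cache).1
                (levMemo s1 s2 (i'+1) j' (levMemo s1 s2 i' (j'+1) cache).2).1)
                (levMemo s1 s2 i' j' (levMemo s1 s2 (i'+1) j' (levMemo s1 s2 i' (j'+1) cache).2).2).1
              = lev2 s1 s2 (i'+1) (j'+1) := by
            rw [hv1, hv2, hv3]; simp only [lev2]; rw [if_neg hch]
          exact ⟨hval, good_insert _ _ _ _ _ _ hc3 hval⟩

theorem levMemo_eval (s1 s2 : List Char) (i j : Nat) :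
    (levMemo s1 s2 i j PySem.Dict.empty).1 = lev2 s1 s2 i j :=
  (levMemo_good s1 s2 (i + j) i j PySem.Dict.empty rfl
    (fun _ _ _ h => by rw [PySem.Dict.get?_empty] at h; cases h)).1

-- the two selection folds stay related: same chosen command, min_distance none ↔ sentinel 3;
-- a pruned command has distance ≥ 3 and is discarded by A's dist ≤ 2 test as well
theorem sel_loop (u : String) (L : List String) :
    ∀ (sa : Option Int × Option String) (sb : Option String × Int),
      sa.2 = sb.1 →
      ((sa.1 = none ∧ sb.2 = 3) ∨ (∃ m, sa.1 = some m ∧ sb.2 = m ∧ m ≤ 2)) →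
      (L.foldl
        (fun (st : Option Int × Option String) cmd =>
          let dist := levA u.toList cmd.toList
          if (decide (dist ≤ 2) && (match st.1 with
                                    | none => true
                                    | some m => decide (dist < m))) = true
          then (some dist, some cmd) else st) sa).2
      = (L.foldl
          (fun (st : Option String × Int) cmd =>
            if 3 ≤ ((u.toList.length : Int) - (cmd.toList.length : Int)).natAbs then st
            else
              let d := (levMemo u.toList cmd.toList u.toList.length cmd.toList.length PySem.Dict.empty).1
              if d < st.2 then (some cmd, d) else st) sb).1 := by
  induction L with
  | nil => intro sa sb h1 _; exact h1
  | cons cmd L' ih =>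
    intro sa sb h1 h2
    obtain ⟨ma, ca⟩ := sa
    obtain ⟨cb, db⟩ := sb
    have hcc : ca = cb := h1
    subst hcc
    have hAB := levA_eq u.toList cmd.toList
    have hBB := levMemo_eval u.toList cmd.toList u.toList.length cmd.toList.length
    obtain ⟨hd1, hd2⟩ := lev2_diff u.toList cmd.toList
      (u.toList.length + cmd.toList.length) u.toList.length cmd.toList.length rfl
    simp only [List.foldl_cons]
    rcases h2 with ⟨hma, hdb⟩ | ⟨m, hma, hdb, hm2⟩
    · have hma' : ma = none := hma
      have hdb' : db = 3 := hdb
      subst hma' hdb'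
      split_ifs with hA hs hB hs2 hB2
      · exfalso; simp at hA; omega
      · exact ih _ _ rfl (Or.inr ⟨_, congrArg some (hAB.trans hBB.symm), rfl, by simp at hA; omega⟩)
      · exfalso; simp at hA; omega
      · exact ih _ _ rfl (Or.inl ⟨rfl, rfl⟩)
      · exfalso; simp at hA; omega
      · exact ih _ _ rfl (Or.inl ⟨rfl, rfl⟩)
    · have hma' : ma = some m := hma
      have hdb' : db = m := hdb
      subst hma' hdb'
      split_ifs with hA hs hB hs2 hB2
      · exfalso; simp at hA; omega
      · exact ih _ _ rfl (Or.inr ⟨_, congrArg some (hAB.trans hBB.symm), rfl, by simp at hA; omega⟩)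
      · exfalso; simp at hA; omega
      · exact ih _ _ rfl (Or.inr ⟨db, rfl, rfl, hm2⟩)
      · exfalso; simp at hA; omega
      · exact ih _ _ rfl (Or.inr ⟨db, rfl, rfl, hm2⟩)

-- ===== VERDICT (by name: the statement is the Claim_ definition above) =====
theorem find_closest_command_spec : Claim_equal_find_closest_command := by
  intro u _
  unfold Spec_find_closest_command find_closest_command find_closest_command_alt
  exact sel_loop u validCommands (none, none) (none, 3) rfl (Or.inl ⟨rfl, rfl⟩)
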